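-- pv_equiv track=rewrite | github.com/KarthickRaghul/Divel---Digital-Evidence-Locker | backend/scripts/populate_cases.py | generate_knowledge_graph
-- ===== SOURCE A (Python) =====
-- def generate_knowledge_graph(case_type, entities):
--     """Generates a mock knowledge graph based on case type and entities."""
--     nodes = []
--     links = []
--
--     # Add core entities as nodes
--     for entity in entities:
--         nodes.append({"id": entity["name"], "group": entity["type"]})
--
--     # Generate some logical links
--     if case_type == "Cyber":
--         links.append({"source": entities[0]["name"], "target": entities[1]["name"], "value": "hacked"})
--         links.append({"source": entities[0]["name"], "target": entities[2]["name"], "value": "accessed_from"})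
--     elif case_type == "Financial":
--         links.append({"source": entities[0]["name"], "target": entities[1]["name"], "value": "authorized_transfer"})
--         links.append({"source": entities[1]["name"], "target": entities[2]["name"], "value": "deposited_to"})
--     elif case_type == "Narcotics":
--          links.append({"source": entities[0]["name"], "target": entities[1]["name"], "value": "smuggled"})
--          links.append({"source": entities[1]["name"], "target": entities[2]["name"], "value": "concealed_in"})
--     elif case_type == "Terrorism":
--          links.append({"source": entities[0]["name"], "target": entities[1]["name"], "value": "orchestrated"})
--          links.append({"source": entities[0]["name"], "target": entities[2]["name"], "value": "supplied_material"})
--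
--     return {"nodes": nodes, "links": links}
-- ===== SOURCE B (Python) =====
-- LINK_RULES = """Cyber: 0 hacked 1, 0 accessed_from 2
-- Financial: 0 authorized_transfer 1, 1 deposited_to 2
-- Narcotics: 0 smuggled 1, 1 concealed_in 2
-- Terrorism: 0 orchestrated 1, 0 supplied_material 2"""
--
--
-- def _rules():
--     """Parse the textual rule table into (case_type, src_idx, relation, tgt_idx) tuples."""
--     rules = []
--     for line in LINK_RULES.splitlines():
--         ct, spec = line.split(": ")
--         for rule in spec.split(", "):
--             s, rel, t = rule.split()
--             rules.append((ct, int(s), rel, int(t)))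
--     return rules
--
--
-- def generate_knowledge_graph(case_type, entities):
--     """Generates a mock knowledge graph based on case type and entities."""
--     nodes = [{"id": e["name"], "group": e["type"]} for e in entities]
--     links = [{"source": entities[s]["name"], "target": entities[t]["name"], "value": rel}
--              for ct, s, rel, t in _rules() if ct == case_type]
--     return {"nodes": nodes, "links": links}
-- ===== Notes on version B (the rewrite author's own statement) =====
-- stated objective: alternative
-- what changed: Replaces A's four-branch if/elif chain of hard-coded appends with a data-driven mini rule engine: the link rules live in one textual table that is parsed at runtime into (case_type, src_idx, relation, tgt_idx) tuples, and links come from filtering those parsed rules against case_type; nodes are built by comprehension instead of an append loop.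
import Mathlib
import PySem

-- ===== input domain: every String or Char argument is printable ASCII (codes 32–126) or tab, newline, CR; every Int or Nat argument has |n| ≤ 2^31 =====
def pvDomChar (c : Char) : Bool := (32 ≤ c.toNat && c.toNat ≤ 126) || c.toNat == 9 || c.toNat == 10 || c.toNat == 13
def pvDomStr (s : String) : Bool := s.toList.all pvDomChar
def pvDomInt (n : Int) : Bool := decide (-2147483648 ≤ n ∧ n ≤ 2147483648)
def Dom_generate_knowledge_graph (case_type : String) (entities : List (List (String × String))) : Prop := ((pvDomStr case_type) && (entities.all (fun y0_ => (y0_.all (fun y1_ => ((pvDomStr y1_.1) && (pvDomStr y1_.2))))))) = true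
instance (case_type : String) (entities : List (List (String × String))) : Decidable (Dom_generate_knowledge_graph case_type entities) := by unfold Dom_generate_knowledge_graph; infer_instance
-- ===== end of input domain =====

-- B replaces A's four-branch if/elif chain of hard-coded appends with a textual rule
-- table parsed at runtime into (case, src, rel, tgt) tuples, filtered against case_type
-- (objective: alternative).


-- entity[k]: first-match lookup in the association list (Pre_ guarantees the key exists,
-- so the "" default is never used on admitted inputs)
def pvLookup (e : List (String × String)) (k : String) : String :=
  ((e.find? (fun p => p.1 == k)).map Prod.snd).getD ""

-- entities[i]["name"] for an Int index i (Pre_ guarantees it is in range wherever used)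
def pvNameAtI (entities : List (List (String × String))) (i : Int) : String :=
  pvLookup ((PySem.List.pyGet? entities i).getD []) "name"

-- ===== PORT A =====
def generate_knowledge_graph (case_type : String) (entities : List (List (String × String))) : List (String × List (List (String × String))) :=
  let nodes : List (List (String × String)) :=
    entities.foldl (fun acc entity =>
      acc ++ [[("id", pvLookup entity "name"), ("group", pvLookup entity "type")]]) []
  let links : List (List (String × String)) :=
    if case_type == "Cyber" then
      [[("source", pvNameAtI entities 0), ("target", pvNameAtI entities 1), ("value", "hacked")],
       [("source", pvNameAtI entities 0), ("target", pvNameAtI entities 2), ("value", "accessed_from")]]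
    else if case_type == "Financial" then
      [[("source", pvNameAtI entities 0), ("target", pvNameAtI entities 1), ("value", "authorized_transfer")],
       [("source", pvNameAtI entities 1), ("target", pvNameAtI entities 2), ("value", "deposited_to")]]
    else if case_type == "Narcotics" then
      [[("source", pvNameAtI entities 0), ("target", pvNameAtI entities 1), ("value", "smuggled")],
       [("source", pvNameAtI entities 1), ("target", pvNameAtI entities 2), ("value", "concealed_in")]]
    else if case_type == "Terrorism" then
      [[("source", pvNameAtI entities 0), ("target", pvNameAtI entities 1), ("value", "orchestrated")],
       [("source", pvNameAtI entities 0), ("target", pvNameAtI entities 2), ("value", "supplied_material")]]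
    else []
  [("nodes", nodes), ("links", links)]

-- ===== PORT B =====
def pvLinkRules : String :=
  "Cyber: 0 hacked 1, 0 accessed_from 2\nFinancial: 0 authorized_transfer 1, 1 deposited_to 2\nNarcotics: 0 smuggled 1, 1 concealed_in 2\nTerrorism: 0 orchestrated 1, 0 supplied_material 2"

-- Source B's _rules(): parse the rule table line by line into (case, src, rel, tgt) tuples
def pvRules : List (String × Int × String × Int) :=
  (PySem.Str.splitlines pvLinkRules).foldl (fun rules line =>
    let parts := (PySem.Str.split? line ": ").getD []
    let ct := parts.getD 0 ""
    let spec := parts.getD 1 ""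
    ((PySem.Str.split? spec ", ").getD []).foldl (fun rules2 rule =>
      let ws := PySem.Str.split₀ rule
      rules2 ++ [(ct, (PySem.Int.ofStr? (ws.getD 0 "")).getD 0, ws.getD 1 "",
                  (PySem.Int.ofStr? (ws.getD 2 "")).getD 0)]) rules) []

def generate_knowledge_graph_alt (case_type : String) (entities : List (List (String × String))) : List (String × List (List (String × String))) :=
  let nodes : List (List (String × String)) :=
    entities.map (fun e => [("id", pvLookup e "name"), ("group", pvLookup e "type")])
  let links : List (List (String × String)) :=
    (pvRules.filter (fun r => r.1 == case_type)).map (fun r =>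
      [("source", pvNameAtI entities r.2.1), ("target", pvNameAtI entities r.2.2.2),
       ("value", r.2.2.1)])
  [("nodes", nodes), ("links", links)]

-- ===== PRECONDITION & SPEC =====
-- Pre_ excludes inputs where the Python A raises: an entity dict missing the "name" or
-- "type" key (KeyError), or one of the four linked case types with fewer than 3 entities
-- (IndexError on entities[1]/entities[2]).
def Pre_generate_knowledge_graph (case_type : String) (entities : List (List (String × String))) : Prop :=
  (∀ e ∈ entities, (e.find? (fun p => p.1 == "name")).isSome ∧ (e.find? (fun p => p.1 == "type")).isSome) ∧
  ((case_type = "Cyber" ∨ case_type = "Financial" ∨ case_type = "Narcotics" ∨ case_type = "Terrorism") → 3 ≤ entities.length)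
instance (case_type : String) (entities : List (List (String × String))) : Decidable (Pre_generate_knowledge_graph case_type entities) := by unfold Pre_generate_knowledge_graph; infer_instance

def pvWitness_generate_knowledge_graph : String × (List (List (String × String))) :=
  ("Cyber", [[("name", "a"), ("type", "IP")], [("name", "b"), ("type", "Person")], [("name", "c"), ("type", "Device")]])

def Spec_generate_knowledge_graph (case_type : String) (entities : List (List (String × String))) (out : List (String × List (List (String × String)))) : Prop := out = generate_knowledge_graph_alt case_type entities
instance (case_type : String) (entities : List (List (String × String))) (out : List (String × List (List (String × String)))) : Decidable (Spec_generate_knowledge_graph case_type entities out) := by unfold Spec_generate_knowledge_graph; infer_instance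

-- ===== CLAIM (what is proved, stated in full; the proofs are below) =====
def Claim_equal_generate_knowledge_graph : Prop := ∀ (case_type : String) (entities : List (List (String × String))), Dom_generate_knowledge_graph case_type entities → Pre_generate_knowledge_graph case_type entities → Spec_generate_knowledge_graph case_type entities (generate_knowledge_graph case_type entities)

-- ===== LEMMAS AND PROOFS =====

-- the parsed rule table, evaluated once
theorem pvRules_eq : pvRules =
    [("Cyber", 0, "hacked", 1), ("Cyber", 0, "accessed_from", 2),
     ("Financial", 0, "authorized_transfer", 1), ("Financial", 1, "deposited_to", 2),
     ("Narcotics", 0, "smuggled", 1), ("Narcotics", 1, "concealed_in", 2),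
     ("Terrorism", 0, "orchestrated", 1), ("Terrorism", 0, "supplied_material", 2)] := by
  set_option maxRecDepth 8192 in decide

-- ===== VERDICT (by name: the statement is the Claim_ definition above) =====
theorem generate_knowledge_graph_spec : Claim_equal_generate_knowledge_graph := by
  intro case_type entities _ _
  unfold Spec_generate_knowledge_graph generate_knowledge_graph generate_knowledge_graph_alt
  rw [PySem.List.foldl_append_singleton_eq_map, pvRules_eq]
  by_cases h1 : case_type = "Cyber"
  · subst h1; rfl
  · by_cases h2 : case_type = "Financial"
    · subst h2; rfl
    · by_cases h3 : case_type = "Narcotics"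
      · subst h3; rfl
      · by_cases h4 : case_type = "Terrorism"
        · subst h4; rfl
        · have e1 : ("Cyber" == case_type) = false := beq_eq_false_iff_ne.mpr (Ne.symm h1)
          have e2 : ("Financial" == case_type) = false := beq_eq_false_iff_ne.mpr (Ne.symm h2)
          have e3 : ("Narcotics" == case_type) = false := beq_eq_false_iff_ne.mpr (Ne.symm h3)
          have e4 : ("Terrorism" == case_type) = false := beq_eq_false_iff_ne.mpr (Ne.symm h4)
          simp [e1, e2, e3, e4, h1, h2, h3, h4]
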